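-- pv_equiv track=rewrite | github.com/hortonhearsadan/AoC | 2021/day23.py | get_best_valid_moves
-- ===== SOURCE A (Python) =====
-- def get_best_valid_moves(all_valid_moves):
--     best_moves = {
--         k: [move for move in moves if move[1] > 0]
--         for k, moves in all_valid_moves.items()
--     }
--     if any(v for v in best_moves.values()):
--         for k, v in best_moves.items():
--             if not v:
--                 continue
--             best_moves[k] = sorted([m for m in v], key=lambda x: -x[1])[:1]
--         return best_moves
--     else:
--         return all_valid_moves
-- ===== SOURCE B (Python) =====
-- def get_best_valid_moves(all_valid_moves):
--     # One pass: running first-maximum of positive moves per key, plus a found flag.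
--     result = {}
--     found = False
--     for k, moves in all_valid_moves.items():
--         best = None
--         for m in moves:
--             if m[1] > 0 and (best is None or m[1] > best[1]):
--                 best = m
--         if best is None:
--             result[k] = []
--         else:
--             result[k] = [best]
--             found = True
--     return result if found else all_valid_moves
-- ===== Notes on version B (the rewrite author's own statement) =====
-- stated objective: faster
-- what changed: Replaces the three passes (filter-comprehension dict, any() scan, re-sort-and-slice loop) by one pass that keeps a running first-maximum positive move per key and a found flag; no intermediate lists and no sorting.
import Mathlib
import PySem

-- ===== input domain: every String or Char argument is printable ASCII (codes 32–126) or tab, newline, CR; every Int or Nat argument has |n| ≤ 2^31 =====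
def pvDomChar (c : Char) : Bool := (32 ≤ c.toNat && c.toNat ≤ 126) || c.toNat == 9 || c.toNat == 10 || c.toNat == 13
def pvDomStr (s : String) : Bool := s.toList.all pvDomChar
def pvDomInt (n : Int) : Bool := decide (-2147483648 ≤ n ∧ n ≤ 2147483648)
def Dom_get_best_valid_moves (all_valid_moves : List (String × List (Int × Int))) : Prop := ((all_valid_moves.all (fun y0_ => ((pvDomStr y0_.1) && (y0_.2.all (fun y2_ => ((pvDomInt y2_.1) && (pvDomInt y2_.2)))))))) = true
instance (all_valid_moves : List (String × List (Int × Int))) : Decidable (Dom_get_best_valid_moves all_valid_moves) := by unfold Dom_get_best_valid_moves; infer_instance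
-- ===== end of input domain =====

-- B: one pass keeping a running first-maximum positive move per key and a found flag (no sort);
-- A: filter comprehension, any() scan, then sort-descending-and-slice per key.

-- ===== PORT A =====
def get_best_valid_moves (all_valid_moves : List (String × List (Int × Int))) : List (String × List (Int × Int)) :=
  -- best_moves = {k: [move for move in moves if move[1] > 0] for k, moves in all_valid_moves.items()}
  let best_moves := all_valid_moves.map (fun kv => (kv.1, kv.2.filter (fun m => decide (m.2 > 0))))
  -- if any(v for v in best_moves.values()):
  if best_moves.any (fun kv => !kv.2.isEmpty) then
    -- for k, v in best_moves.items(): if not v: continue; best_moves[k] = sorted([m for m in v], key=lambda x: -x[1])[:1]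
    best_moves.map (fun kv =>
      if kv.2.isEmpty then kv
      else (kv.1, (PySem.List.sorted kv.2 (fun m => -m.2) false).take 1))
  else
    all_valid_moves

-- ===== PORT B =====
def pvBestPos (moves : List (Int × Int)) : Option (Int × Int) :=
  moves.foldl (fun b m =>
    if m.2 > 0 then
      match b with
      | none => some m
      | some x => if m.2 > x.2 then some m else b
    else b) none

def get_best_valid_moves_alt (all_valid_moves : List (String × List (Int × Int))) : List (String × List (Int × Int)) :=
  let r := all_valid_moves.foldl (fun acc kv =>
    match pvBestPos kv.2 with
    | none => (acc.1 ++ [(kv.1, ([] : List (Int × Int)))], acc.2)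
    | some b => (acc.1 ++ [(kv.1, [b])], true)) (([] : List (String × List (Int × Int))), false)
  if r.2 then r.1 else all_valid_moves

-- ===== PRECONDITION & SPEC =====
def Spec_get_best_valid_moves (all_valid_moves : List (String × List (Int × Int))) (out : List (String × List (Int × Int))) : Prop := out = get_best_valid_moves_alt all_valid_moves
instance (all_valid_moves : List (String × List (Int × Int))) (out : List (String × List (Int × Int))) : Decidable (Spec_get_best_valid_moves all_valid_moves out) := by unfold Spec_get_best_valid_moves; infer_instance

-- ===== CLAIM (what is proved, stated in full; the proofs are below) =====
def Claim_equal_get_best_valid_moves : Prop := ∀ (all_valid_moves : List (String × List (Int × Int))), Dom_get_best_valid_moves all_valid_moves → Spec_get_best_valid_moves all_valid_moves (get_best_valid_moves all_valid_moves)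

-- ===== LEMMAS AND PROOFS =====

-- head? of insertBy depends only on head? of the target list
theorem pv_head_insertBy (before : (Int × Int) → (Int × Int) → Bool) (x : Int × Int)
    (ys : List (Int × Int)) :
    (PySem.List.insertBy before x ys).head? =
      some (match ys.head? with
            | none => x
            | some h => if before x h then x else h) := by
  cases ys with
  | nil => simp [PySem.List.insertBy]
  | cons y t =>
    by_cases h : before x y
    · simp [PySem.List.insertBy, h]
    · simp [PySem.List.insertBy, h]

-- the first-max fold over an accumulated insertion sort: head? of the foldl of insertBy
theorem pv_head_foldl_insertBy (l : List (Int × Int)) :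
    ∀ acc : List (Int × Int),
      (l.foldl (fun acc x =>
          PySem.List.insertBy (fun a b => decide ((-a.2 : Int) < -b.2)) x acc) acc).head? =
        l.foldl (fun h m =>
          some (match h with
                | none => m
                | some x => if m.2 > x.2 then m else x)) acc.head? := by
  induction l with
  | nil => intro acc; simp
  | cons m t ih =>
    intro acc
    rw [List.foldl_cons, List.foldl_cons, ih, pv_head_insertBy]
    cases hh : acc.head? with
    | none => simp
    | some h =>
      by_cases hc : (m.2 : Int) > h.2
      · have : ((-m.2 : Int) < -h.2) = True := by simp; omega
        simp [this, hc]
      · have : ¬ ((-m.2 : Int) < -h.2) := by omega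
        simp [this, hc]

-- pvBestPos over l equals the first-max fold over the positive-filtered list
theorem pv_bestPos_eq_filter_fold (l : List (Int × Int)) :
    ∀ b : Option (Int × Int),
      (l.foldl (fun b m =>
        if m.2 > 0 then
          match b with
          | none => some m
          | some x => if m.2 > x.2 then some m else b
        else b) b) =
      ((l.filter (fun m => decide (m.2 > 0))).foldl (fun h m =>
          some (match h with
                | none => m
                | some x => if m.2 > x.2 then m else x)) b) := by
  induction l with
  | nil => intro b; simp
  | cons m t ih =>
    intro b
    by_cases hp : (m.2 : Int) > 0
    · simp only [List.foldl_cons, List.filter_cons, hp, decide_true, if_true]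
      rw [ih]
      cases b with
      | none => simp
      | some x =>
        by_cases hc : (m.2 : Int) > x.2 <;> simp [hc]
    · simp only [List.foldl_cons, List.filter_cons, hp, decide_false, if_false]
      rw [ih]
      simp

-- the running-max fold never returns none once seeded
theorem pv_foldmax_ne_none (l : List (Int × Int)) : ∀ z : Int × Int,
    (l.foldl (fun h m =>
      some (match h with
            | none => m
            | some x => if m.2 > x.2 then m else x)) (some z)) ≠ none := by
  induction l with
  | nil => intro z; simp
  | cons a t ih => intro z; simp only [List.foldl_cons]; split <;> exact ih _

-- per-key agreement: A's sorted-take-1 value matches B's bestPos value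
theorem pv_perkey (moves : List (Int × Int)) :
    (match pvBestPos moves with
      | none => ([] : List (Int × Int))
      | some b => [b]) =
    (if (moves.filter (fun m => decide (m.2 > 0))).isEmpty then
        moves.filter (fun m => decide (m.2 > 0))
      else (PySem.List.sorted (moves.filter (fun m => decide (m.2 > 0)))
              (fun m => -m.2) false).take 1) := by
  have hfold := pv_bestPos_eq_filter_fold moves none
  have hhead := pv_head_foldl_insertBy (moves.filter (fun m => decide (m.2 > 0))) []
  rw [PySem.List.sorted_eq_foldl_insertBy]
  cases hf : moves.filter (fun m => decide (m.2 > 0)) with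
  | nil =>
    have : pvBestPos moves = none := by
      unfold pvBestPos; rw [hfold, hf]; rfl
    simp [this]
  | cons y ys =>
    have hne : ((y :: ys).foldl (fun h m =>
        some (match h with
              | none => m
              | some x => if m.2 > x.2 then m else x)) (none : Option (Int × Int))) ≠ none := by
      simpa using pv_foldmax_ne_none ys y
    cases hb : pvBestPos moves with
    | none =>
      exfalso
      apply hne
      have : pvBestPos moves = ((y :: ys).foldl (fun h m =>
          some (match h with
                | none => m
                | some x => if m.2 > x.2 then m else x)) none) := by
        unfold pvBestPos; rw [hfold, hf]
      rw [← this, hb]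
    | some b =>
      have hbv : ((y :: ys).foldl (fun h m =>
          some (match h with
                | none => m
                | some x => if m.2 > x.2 then m else x)) (none : Option (Int × Int))) = some b := by
        have : pvBestPos moves = ((y :: ys).foldl (fun h m =>
            some (match h with
                  | none => m
                  | some x => if m.2 > x.2 then m else x)) none) := by
          unfold pvBestPos; rw [hfold, hf]
        rw [← this, hb]
      have hhead' : (((y :: ys).foldl (fun acc x =>
          PySem.List.insertBy (fun a b => decide ((-a.2 : Int) < -b.2)) x acc) [])).head? = some b := by
        rw [hf] at hhead
        simpa [hbv] using hhead
      simp only [List.isEmpty_cons, if_false, Bool.false_eq_true]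
      cases hsort : ((y :: ys).foldl (fun acc x =>
          PySem.List.insertBy (fun a b => decide ((-a.2 : Int) < -b.2)) x acc) []) with
      | nil => rw [hsort] at hhead'; simp at hhead'
      | cons s st =>
        rw [hsort] at hhead'
        simp at hhead'
        simp [hhead']

-- B's fold, with the flag and prefix generalized
theorem pv_fold_unfold (l : List (String × List (Int × Int))) :
    ∀ (p : List (String × List (Int × Int))) (f : Bool),
      (l.foldl (fun acc kv =>
        match pvBestPos kv.2 with
        | none => (acc.1 ++ [(kv.1, ([] : List (Int × Int)))], acc.2)
        | some b => (acc.1 ++ [(kv.1, [b])], true)) (p, f)) =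
      (p ++ l.map (fun kv => (kv.1,
          match pvBestPos kv.2 with
          | none => ([] : List (Int × Int))
          | some b => [b])),
       f || l.any (fun kv => !(pvBestPos kv.2).isNone)) := by
  induction l with
  | nil => intro p f; simp
  | cons kv t ih =>
    intro p f
    cases hb : pvBestPos kv.2 with
    | none => simp [List.foldl_cons, hb, ih]
    | some b => simp [List.foldl_cons, hb, ih]

-- the two "any" conditions coincide
theorem pv_any_eq (l : List (String × List (Int × Int))) :
    (l.map (fun kv => (kv.1, kv.2.filter (fun m => decide (m.2 > 0))))).any (fun kv => !kv.2.isEmpty)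
      = l.any (fun kv => !(pvBestPos kv.2).isNone) := by
  induction l with
  | nil => rfl
  | cons kv t ih =>
    simp only [List.map_cons, List.any_cons, ih]
    congr 1
    have hfold := pv_bestPos_eq_filter_fold kv.2 none
    cases hf : kv.2.filter (fun m => decide (m.2 > 0)) with
    | nil =>
      have : pvBestPos kv.2 = none := by unfold pvBestPos; rw [hfold, hf]; rfl
      simp [this]
    | cons y ys =>
      have h2 := pv_perkey kv.2
      rw [hf] at h2
      simp only [List.isEmpty_cons, if_false, Bool.false_eq_true] at h2
      cases hb : pvBestPos kv.2 with
      | none =>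
        exfalso
        unfold pvBestPos at hb
        rw [hfold, hf, List.foldl_cons] at hb
        exact pv_foldmax_ne_none ys _ (by simpa using hb)
      | some b => simp

-- ===== VERDICT (by name: the statement is the Claim_ definition above) =====
theorem get_best_valid_moves_spec : Claim_equal_get_best_valid_moves := by
  intro avm _
  unfold Spec_get_best_valid_moves get_best_valid_moves get_best_valid_moves_alt
  rw [pv_fold_unfold avm [] false]
  simp only [List.nil_append, Bool.false_or]
  rw [← pv_any_eq avm]
  by_cases h : (avm.map (fun kv => (kv.1, kv.2.filter (fun m => decide (m.2 > 0))))).any (fun kv => !kv.2.isEmpty)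
  · simp only [h, if_true]
    rw [List.map_map]
    apply List.map_congr_left
    intro kv _
    have := pv_perkey kv.2
    simp only [Function.comp]
    rw [this]
    by_cases he : (kv.2.filter (fun m => decide (m.2 > 0))).isEmpty
    · have : kv.2.filter (fun m => decide (m.2 > 0)) = [] := by simpa using he
      simp [this]
    · simp [he]
  · simp [h]
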